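-- pv_equiv track=rewrite | github.com/himi1/Codefights | Tournaments/CodeMaster'sTourneySolutionsPart3.py | countSumOfTwoRepresentations
-- ===== SOURCE A (Python) =====
-- def countSumOfTwoRepresentations(n, l, r):
--     result = 0
--
--     for a in range(l, r + 1):
--         b = a
--         while b <= r:
--             if a + b == n:
--                 result += 1
--             b += 1
--
--     return result
-- ===== SOURCE B (Python) =====
-- def countSumOfTwoRepresentations(n, l, r):
--     # closed form: valid a satisfy max(l, n - r) <= a <= n // 2 (then b = n - a gives a <= b <= r)
--     lo = max(l, n - r)
--     hi = n // 2
--     return max(0, hi - lo + 1)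
-- ===== Notes on version B (the rewrite author's own statement) =====
-- stated objective: simpler
-- what changed: Replaced the double loop over all (a,b) pairs by a closed-form count of valid a in [max(l,n-r), n//2].
import Mathlib
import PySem

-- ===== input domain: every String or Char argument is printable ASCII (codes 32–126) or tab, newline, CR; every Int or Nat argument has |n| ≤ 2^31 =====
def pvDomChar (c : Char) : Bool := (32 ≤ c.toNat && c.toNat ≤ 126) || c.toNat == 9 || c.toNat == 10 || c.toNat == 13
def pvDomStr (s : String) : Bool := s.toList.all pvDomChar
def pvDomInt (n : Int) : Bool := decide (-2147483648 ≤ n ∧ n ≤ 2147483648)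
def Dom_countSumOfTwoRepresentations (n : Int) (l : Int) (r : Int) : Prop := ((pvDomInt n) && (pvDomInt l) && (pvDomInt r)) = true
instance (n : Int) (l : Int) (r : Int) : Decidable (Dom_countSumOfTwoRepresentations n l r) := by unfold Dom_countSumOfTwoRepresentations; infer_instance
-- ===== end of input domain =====

-- B replaces A's double loop by a closed-form count of the valid a in [max(l, n-r), n // 2].

-- ===== PORT A =====
-- inner 'while b <= r' loop of A
def pvInnerA (n r a b acc : Int) : Int :=
  if _h : b ≤ r then
    pvInnerA n r a (b + 1) (if a + b = n then acc + 1 else acc)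
  else acc
termination_by (r + 1 - b).toNat
decreasing_by omega

def countSumOfTwoRepresentations (n : Int) (l : Int) (r : Int) : Int :=
  (PySem.List.pyRange l (r + 1) 1).foldl (fun result a => pvInnerA n r a a result) 0

-- ===== PORT B =====
def countSumOfTwoRepresentations_alt (n : Int) (l : Int) (r : Int) : Int :=
  max 0 (PySem.Int.floordiv n 2 - max l (n - r) + 1)

-- ===== PRECONDITION & SPEC =====
def Spec_countSumOfTwoRepresentations (n : Int) (l : Int) (r : Int) (out : Int) : Prop := out = countSumOfTwoRepresentations_alt n l r
instance (n : Int) (l : Int) (r : Int) (out : Int) : Decidable (Spec_countSumOfTwoRepresentations n l r out) := by unfold Spec_countSumOfTwoRepresentations; infer_instance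

-- ===== CLAIM (what is proved, stated in full; the proofs are below) =====
def Claim_equal_countSumOfTwoRepresentations : Prop := ∀ (n : Int) (l : Int) (r : Int), Dom_countSumOfTwoRepresentations n l r → Spec_countSumOfTwoRepresentations n l r (countSumOfTwoRepresentations n l r)

-- ===== LEMMAS AND PROOFS =====

-- the inner while loop adds 1 exactly when n - a lies in [b, r]
lemma pvInnerA_eq (n r a : Int) : ∀ (k : Nat) (b acc : Int), (r + 1 - b).toNat = k →
    pvInnerA n r a b acc = acc + (if b ≤ n - a ∧ n - a ≤ r then 1 else 0) := by
  intro k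
  induction k with
  | zero =>
      intro b acc hk
      rw [pvInnerA]
      rw [dif_neg (by omega)]
      split_ifs with h <;> omega
  | succ k ih =>
      intro b acc hk
      rw [pvInnerA]
      rw [dif_pos (by omega)]
      rw [ih (b + 1) _ (by omega)]
      split_ifs <;> omega

-- the outer for loop sums the inner-loop indicators over a ∈ [l, r]
lemma outer_eq (n r : Int) : ∀ (k : Nat) (l acc : Int), (r + 1 - l).toNat = k →
    (PySem.List.pyRange l (r + 1) 1).foldl (fun result a => pvInnerA n r a a result) acc
      = acc + max 0 (min (n / 2) r - max l (n - r) + 1) := by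
  intro k
  induction k with
  | zero =>
      intro l acc hk
      have he : PySem.List.pyRange l (r + 1) 1 = [] := by
        simp [PySem.List.pyRange_one, show (r + 1 - l).toNat = 0 from hk]
      rw [he]
      simp only [List.foldl_nil]
      omega
  | succ k ih =>
      intro l acc hk
      rw [PySem.List.pyRange_one_cons (by omega)]
      simp only [List.foldl_cons]
      rw [ih (l + 1) _ (by omega)]
      rw [pvInnerA_eq n r l (r + 1 - l).toNat l acc rfl]
      have h2 : l ≤ n - l ↔ l ≤ n / 2 := by omega
      split_ifs with h <;> omega

-- ===== VERDICT (by name: the statement is the Claim_ definition above) =====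
theorem countSumOfTwoRepresentations_spec : Claim_equal_countSumOfTwoRepresentations := by
  intro n l r _
  unfold Spec_countSumOfTwoRepresentations countSumOfTwoRepresentations countSumOfTwoRepresentations_alt
  rw [outer_eq n r (r + 1 - l).toNat l 0 rfl]
  have hf : PySem.Int.floordiv n 2 = n / 2 := by
    simp [PySem.Int.floordiv, Int.fdiv_eq_ediv]
  rw [hf]
  omega
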